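-- pv_equiv track=rewrite | github.com/imahdimir/portfos-py-modules | Dev/key_name.py | excel_style
-- ===== SOURCE A (Python) =====
-- def excel_style(
--     row ,
--     col
--     ) :
--   """ Convert given row and column number to an Excel-style cell name. """
--   LETTERS = 'ABCDEFGHIJKLMNOPQRSTUVWXYZ'
--   result = []
--   while col :
--     col , rem = divmod(col - 1 , 26)
--     result[:0] = LETTERS[rem]
--   return ''.join(result) + str(row)
-- ===== SOURCE B (Python) =====
-- def excel_style(row, col):
--     """ Convert given row and column number to an Excel-style cell name. """
--     LETTERS = 'ABCDEFGHIJKLMNOPQRSTUVWXYZ'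
--
--     def to_letters(c):
--         if c <= 0:
--             return ''
--         q, r = divmod(c - 1, 26)
--         return to_letters(q) + LETTERS[r]
--
--     return to_letters(col) + str(row)
-- ===== Notes on version B (the rewrite author's own statement) =====
-- stated objective: alternative
-- what changed: Replaces A's while-loop that extracts letters least-significant-first and prepends each into a list with a recursive helper that builds the letters most-significant-first via the call stack and string concatenation.
import Mathlib
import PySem

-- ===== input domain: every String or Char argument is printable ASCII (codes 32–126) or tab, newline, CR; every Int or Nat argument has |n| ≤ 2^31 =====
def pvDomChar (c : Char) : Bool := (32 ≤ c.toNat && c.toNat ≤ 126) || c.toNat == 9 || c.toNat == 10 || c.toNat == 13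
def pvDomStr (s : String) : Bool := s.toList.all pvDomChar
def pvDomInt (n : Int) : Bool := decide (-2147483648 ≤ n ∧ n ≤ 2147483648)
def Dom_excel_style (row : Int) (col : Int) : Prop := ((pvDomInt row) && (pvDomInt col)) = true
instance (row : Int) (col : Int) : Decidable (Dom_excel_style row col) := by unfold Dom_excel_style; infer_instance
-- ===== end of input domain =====

-- B replaces A's while-loop (least-significant letter extracted first, prepended into a list)
-- by a recursive helper building the most-significant letter first via the call stack: alternative decomposition.


-- ===== PORT A =====
def pvLETTERS : List Char := "ABCDEFGHIJKLMNOPQRSTUVWXYZ".toList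

-- the while-loop of A; fuel only makes the recursion total (inside Pre_, col.toNat + 1 steps always suffice).
-- LETTERS[rem] is ported with pyGetD: on every reached iteration rem = (col-1) % 26 lies in [0, 26), so the
-- default is never used and the lookup is exact.
def excelLoopA : Nat → Int → List Char → List Char
  | 0, _, result => result
  | fuel + 1, col, result =>
    if col = 0 then result
    else
      let col' := PySem.Int.floordiv (col - 1) 26
      let rem := PySem.Int.mod (col - 1) 26
      excelLoopA fuel col' (PySem.List.pyGetD pvLETTERS rem ' ' :: result)

-- ''.join(result) + str(row), through List Char (PySem.Int.toChars = str(row))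
def excel_style (row : Int) (col : Int) : String :=
  String.ofList (excelLoopA (col.toNat + 1) col [] ++ PySem.Int.toChars row)

-- ===== PORT B =====
-- recursive to_letters from Source B (string concatenation done on List Char)
def toLettersB (col : Int) : List Char :=
  if _h : col ≤ 0 then []
  else
    toLettersB (PySem.Int.floordiv (col - 1) 26) ++
      [PySem.List.pyGetD pvLETTERS (PySem.Int.mod (col - 1) 26) ' ']
termination_by col.toNat
decreasing_by
  have _h1 : (0:Int) < col := by omega
  have h2 : PySem.Int.floordiv (col - 1) 26 ≤ col - 1 := by
    rw [PySem.Int.floordiv_eq_ediv_of_pos (by omega)]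
    exact Int.ediv_le_self _ (by omega)
  omega

def excel_style_alt (row : Int) (col : Int) : String :=
  String.ofList (toLettersB col ++ PySem.Int.toChars row)

-- ===== PRECONDITION & SPEC =====
-- Pre_ excludes col < 0, on which A's 'while col' never terminates (divmod keeps col negative forever).
def Pre_excel_style (row : Int) (col : Int) : Prop := 0 ≤ col
instance (row : Int) (col : Int) : Decidable (Pre_excel_style row col) := by unfold Pre_excel_style; infer_instance
def pvWitness_excel_style : Int × Int := (1, 28)

def Spec_excel_style (row : Int) (col : Int) (out : String) : Prop := out = excel_style_alt row col
instance (row : Int) (col : Int) (out : String) : Decidable (Spec_excel_style row col out) := by unfold Spec_excel_style; infer_instance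

-- ===== CLAIM (what is proved, stated in full; the proofs are below) =====
def Claim_equal_excel_style : Prop := ∀ (row : Int) (col : Int), Dom_excel_style row col → Pre_excel_style row col → Spec_excel_style row col (excel_style row col)

-- ===== LEMMAS AND PROOFS =====

lemma excelLoopA_eq_toLettersB (n : Nat) : ∀ (col : Int) (res : List Char),
    0 ≤ col → col.toNat < n → excelLoopA n col res = toLettersB col ++ res := by
  induction n with
  | zero => intro col res _ h; omega
  | succ n ih =>
    intro col res h0 hlt
    by_cases hz : col = 0
    · subst hz
      simp [excelLoopA, toLettersB]
    · have hpos : (0:Int) < col := by omega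
      have hq0 : 0 ≤ PySem.Int.floordiv (col - 1) 26 := by
        rw [PySem.Int.floordiv_eq_ediv_of_pos (by omega)]
        exact Int.ediv_nonneg (by omega) (by omega)
      have hqle : PySem.Int.floordiv (col - 1) 26 ≤ col - 1 := by
        rw [PySem.Int.floordiv_eq_ediv_of_pos (by omega)]
        exact Int.ediv_le_self _ (by omega)
      have hqlt : (PySem.Int.floordiv (col - 1) 26).toNat < n := by omega
      have step : excelLoopA (n + 1) col res =
          excelLoopA n (PySem.Int.floordiv (col - 1) 26)
            (PySem.List.pyGetD pvLETTERS (PySem.Int.mod (col - 1) 26) ' ' :: res) := by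
        simp [excelLoopA, hz]
      rw [step, ih _ _ hq0 hqlt]
      conv_rhs => rw [toLettersB]
      simp [show ¬ col ≤ 0 by omega]

-- ===== VERDICT (by name: the statement is the Claim_ definition above) =====
theorem excel_style_spec : Claim_equal_excel_style := by
  intro row col _ hpre
  unfold Spec_excel_style excel_style excel_style_alt
  rw [excelLoopA_eq_toLettersB (col.toNat + 1) col [] hpre (by omega)]
  simp
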